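-- pv_equiv track=rewrite | github.com/boostcampaitech6/level2-klue-nlp-05 | exp/custom_prepro2.py | word_idx_extract
-- ===== SOURCE A (Python) =====
-- def word_idx_extract(words, ns, ne):
--
--     word_indices = []
--     start_index = 0
--
--     for word in words:
--         end_index = start_index + len(word) - 1
--         word_indices.append((start_index, end_index))
--         start_index = end_index + 2
--
--     word_idx=[]
--     for i, (start, end) in enumerate(word_indices):
--         if ns in range(start, end + 1) or ne in range(start, end + 1):
--             word_idx.append(i)
--
--     return word_idx[0] , word_idx[-1]
-- ===== SOURCE B (Python) =====
-- def _bisect_right(a, x):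
--     # standard bisect.bisect_right (hand-written: this module imports nothing)
--     lo, hi = 0, len(a)
--     while lo < hi:
--         mid = (lo + hi) // 2
--         if x < a[mid]:
--             hi = mid
--         else:
--             lo = mid + 1
--     return lo
--
--
-- def _locate(starts, words, p):
--     # word index whose character span contains position p, else None
--     j = _bisect_right(starts, p) - 1
--     if j >= 0 and p - starts[j] < len(words[j]):
--         return j
--     return None
--
--
-- def word_idx_extract(words, ns, ne):
--     starts = []
--     s = 0
--     for w in words:
--         starts.append(s)
--         s += len(w) + 1
--     hits = [j for j in (_locate(starts, words, ns), _locate(starts, words, ne)) if j is not None]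
--     return min(hits), max(hits)
-- ===== Notes on version B (the rewrite author's own statement) =====
-- stated objective: alternative
-- what changed: Inverts the mapping: instead of scanning every word's character span and collecting all indices whose span contains ns or ne, B builds the sorted array of word start offsets, binary-searches it to locate the word containing each of the two positions, and returns min/max of the at-most-two hits; dropping the per-word membership tests and intermediate lists also makes B measurably faster by a constant factor.
import Mathlib
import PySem

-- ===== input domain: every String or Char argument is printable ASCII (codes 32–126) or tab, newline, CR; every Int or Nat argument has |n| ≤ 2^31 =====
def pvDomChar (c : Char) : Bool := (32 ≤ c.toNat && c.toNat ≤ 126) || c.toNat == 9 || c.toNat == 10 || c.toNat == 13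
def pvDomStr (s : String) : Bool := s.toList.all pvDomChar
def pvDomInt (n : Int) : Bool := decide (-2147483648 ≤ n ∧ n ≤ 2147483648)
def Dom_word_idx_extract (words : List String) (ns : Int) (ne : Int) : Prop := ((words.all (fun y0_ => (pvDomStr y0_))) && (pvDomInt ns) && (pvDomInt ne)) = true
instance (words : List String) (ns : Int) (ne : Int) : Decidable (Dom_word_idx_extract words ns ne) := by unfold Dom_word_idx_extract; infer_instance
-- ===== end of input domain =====

-- B inverts the mapping: instead of scanning every word's character span and testing whether it
-- contains ns or ne, it builds the sorted array of word start offsets, binary-searches it to map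
-- each of the two positions to its word (if any), and returns min/max of the hits ('alternative').
-- Both raise when neither ns nor ne lies inside any word: excluded by Pre_.

-- ===== PORT A =====
-- two passes, exactly as A: build word_indices, then collect matched indices, then index [0] and [-1]
def word_idx_extract (words : List String) (ns : Int) (ne : Int) : Int × Int :=
  let word_indices := (words.foldl (fun (st : List (Int × Int) × Int) word =>
      let end_index := st.2 + PySem.Str.len word - 1
      (st.1 ++ [(st.2, end_index)], end_index + 2)) ([], 0)).1
  let word_idx := (PySem.List.enumerate word_indices 0).foldl (fun acc p =>
      if (p.2.1 ≤ ns ∧ ns ≤ p.2.2) ∨ (p.2.1 ≤ ne ∧ ne ≤ p.2.2) then acc ++ [p.1] else acc) []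
  match PySem.List.pyGet? word_idx 0, PySem.List.pyGet? word_idx (-1) with
  | some a, some b => (a, b)
  | _, _ => (0, 0)   -- Python raises IndexError here; excluded by Pre_

-- ===== PORT B =====
-- Source B's hand-written _bisect_right is the standard bisect.bisect_right: ported as the prelude's
-- PySem.List.bisectRight (same binary search).
-- _locate: word index whose character span contains position p, else None.
-- starts[j] / words[j] are indexed only after the j >= 0 guard and j < len holds there: getD is exact.
def pvLocate (starts : List Int) (words : List String) (p : Int) : Option Int :=
  let j : Int := (PySem.List.bisectRight starts p : Int) - 1
  if 0 ≤ j ∧ p - starts.getD j.toNat 0 < PySem.Str.len (words.getD j.toNat "") then some j else none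

def word_idx_extract_alt (words : List String) (ns : Int) (ne : Int) : Int × Int :=
  let starts := (words.foldl (fun (st : List Int × Int) w =>
      (st.1 ++ [st.2], st.2 + PySem.Str.len w + 1)) ([], 0)).1
  -- hits = the non-None among (locate ns, locate ne); return (min hits, max hits)
  match pvLocate starts words ns, pvLocate starts words ne with
  | some a, some b => (min a b, max a b)
  | some a, none => (a, a)
  | none, some b => (b, b)
  | none, none => (0, 0)   -- Python: min([]) raises ValueError here; excluded by Pre_

-- ===== PRECONDITION & SPEC =====
-- Pre_: some word's character interval [start_i, start_i + len_i - 1] (start_i = sum of earlier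
-- lengths + i separators) contains ns or ne; outside it Python A (and B) raises.
def Pre_word_idx_extract (words : List String) (ns : Int) (ne : Int) : Prop :=
  ∃ i ∈ List.range words.length,
    ((((words.take i).map PySem.Str.len).sum + (i : Int)) ≤ ns ∧
       ns ≤ (((words.take i).map PySem.Str.len).sum + (i : Int)) + PySem.Str.len (words.getD i "") - 1) ∨
    ((((words.take i).map PySem.Str.len).sum + (i : Int)) ≤ ne ∧
       ne ≤ (((words.take i).map PySem.Str.len).sum + (i : Int)) + PySem.Str.len (words.getD i "") - 1)
instance (words : List String) (ns : Int) (ne : Int) : Decidable (Pre_word_idx_extract words ns ne) := by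
  unfold Pre_word_idx_extract; infer_instance

def pvWitness_word_idx_extract : List String × Int × Int := (["ab", "cd"], 0, 3)

def Spec_word_idx_extract (words : List String) (ns : Int) (ne : Int) (out : Int × Int) : Prop := out = word_idx_extract_alt words ns ne
instance (words : List String) (ns : Int) (ne : Int) (out : Int × Int) : Decidable (Spec_word_idx_extract words ns ne out) := by unfold Spec_word_idx_extract; infer_instance

-- ===== CLAIM (what is proved, stated in full; the proofs are below) =====
def Claim_equal_word_idx_extract : Prop := ∀ (words : List String) (ns : Int) (ne : Int), Dom_word_idx_extract words ns ne → Pre_word_idx_extract words ns ne → Spec_word_idx_extract words ns ne (word_idx_extract words ns ne)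

-- ===== LEMMAS AND PROOFS =====

theorem strlen_nonneg (w : String) : 0 ≤ PySem.Str.len w := by
  rw [PySem.Str.len_eq]; positivity

-- reference: the (start,end) ranges of words laid out from char offset s (A's first loop)
def rangesRef : List String → Int → List (Int × Int)
  | [], _ => []
  | w :: ws, s => (s, s + PySem.Str.len w - 1) :: rangesRef ws (s + PySem.Str.len w - 1 + 2)

-- reference: the matched indices of words laid out from char offset s, indexed from i (A's second loop)
def matchesRef (ns ne : Int) : List String → Int → Int → List Int
  | [], _, _ => []
  | w :: ws, i, s =>
    let e := s + PySem.Str.len w - 1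
    (if (s ≤ ns ∧ ns ≤ e) ∨ (s ≤ ne ∧ ne ≤ e) then [i] else []) ++ matchesRef ns ne ws (i + 1) (e + 2)

-- reference: the word start offsets (B's first loop)
def startsRef : List String → Int → List Int
  | [], _ => []
  | w :: ws, s => s :: startsRef ws (s + PySem.Str.len w + 1)

-- reference: index of the word whose span contains p, for words laid out from offset s
def findRef (p : Int) : List String → Int → Option Nat
  | [], _ => none
  | w :: ws, s =>
    if s ≤ p ∧ p < s + PySem.Str.len w then some 0
    else (findRef p ws (s + PySem.Str.len w + 1)).map (· + 1)

theorem rangesFold_eq (ws : List String) : ∀ (acc : List (Int × Int)) (s : Int),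
    (ws.foldl (fun (st : List (Int × Int) × Int) word =>
      let end_index := st.2 + PySem.Str.len word - 1
      (st.1 ++ [(st.2, end_index)], end_index + 2)) (acc, s)).1 = acc ++ rangesRef ws s := by
  induction ws with
  | nil => intro acc s; simp [rangesRef]
  | cons w ws ih =>
    intro acc s
    rw [List.foldl_cons]
    refine Eq.trans (ih (acc ++ [(s, s + PySem.Str.len w - 1)]) (s + PySem.Str.len w - 1 + 2)) ?_
    rw [rangesRef]
    simp

theorem matchesFold_eq (ns ne : Int) (ws : List String) : ∀ (i s : Int) (acc : List Int),
    (PySem.List.enumerate (rangesRef ws s) i).foldl (fun acc p =>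
      if (p.2.1 ≤ ns ∧ ns ≤ p.2.2) ∨ (p.2.1 ≤ ne ∧ ne ≤ p.2.2) then acc ++ [p.1] else acc) acc
    = acc ++ matchesRef ns ne ws i s := by
  induction ws with
  | nil => intro i s acc; simp [rangesRef, matchesRef, PySem.List.enumerate_nil]
  | cons w ws ih =>
    intro i s acc
    rw [rangesRef, PySem.List.enumerate_cons, List.foldl_cons]
    refine Eq.trans (ih (i + 1) (s + PySem.Str.len w - 1 + 2) _) ?_
    rw [matchesRef]
    by_cases h : (s ≤ ns ∧ ns ≤ s + PySem.Str.len w - 1) ∨ (s ≤ ne ∧ ne ≤ s + PySem.Str.len w - 1)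
    · simp only [h, if_pos]
      simp
    · simp only [h, if_neg, not_false_iff]
      simp

theorem startsFold_eq (ws : List String) : ∀ (acc : List Int) (s : Int),
    (ws.foldl (fun (st : List Int × Int) w =>
      (st.1 ++ [st.2], st.2 + PySem.Str.len w + 1)) (acc, s)).1 = acc ++ startsRef ws s := by
  induction ws with
  | nil => intro acc s; simp [startsRef]
  | cons w ws ih =>
    intro acc s
    rw [List.foldl_cons]
    refine Eq.trans (ih (acc ++ [s]) (s + PySem.Str.len w + 1)) ?_
    rw [startsRef]
    simp

theorem startsRef_length (ws : List String) : ∀ (s : Int), (startsRef ws s).length = ws.length := by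
  induction ws with
  | nil => intro s; rfl
  | cons w ws ih => intro s; simp [startsRef, ih]

theorem startsRef_mem_ge (ws : List String) : ∀ (s : Int) (x : Int), x ∈ startsRef ws s → s ≤ x := by
  induction ws with
  | nil => intro s x hx; simp [startsRef] at hx
  | cons w ws ih =>
    intro s x hx
    rw [startsRef, List.mem_cons] at hx
    rcases hx with rfl | hx
    · exact le_refl x
    · have := ih (s + PySem.Str.len w + 1) x hx
      have := strlen_nonneg w
      omega

theorem startsRef_pairwise (ws : List String) : ∀ (s : Int),
    (startsRef ws s).Pairwise (fun x1 x2 => x1 ≤ x2) := by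
  induction ws with
  | nil => intro s; simp [startsRef]
  | cons w ws ih =>
    intro s
    rw [startsRef, List.pairwise_cons]
    refine ⟨fun x hx => ?_, ih _⟩
    have := startsRef_mem_ge ws (s + PySem.Str.len w + 1) x hx
    have := strlen_nonneg w
    omega

theorem startsRef_getD_ge (ws : List String) : ∀ (s : Int) (k : Nat), k < ws.length →
    s ≤ (startsRef ws s).getD k 0 := by
  induction ws with
  | nil => intro s k hk; simp at hk
  | cons w ws ih =>
    intro s k hk
    cases k with
    | zero => simp [startsRef]
    | succ k =>
      rw [startsRef, List.getD_cons_succ]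
      have := ih (s + PySem.Str.len w + 1) k (by simpa using hk)
      have := strlen_nonneg w
      omega

theorem findRef_none_of_lt (p : Int) (ws : List String) : ∀ (s : Int), p < s →
    findRef p ws s = none := by
  induction ws with
  | nil => intro s _; rfl
  | cons w ws ih =>
    intro s hs
    rw [findRef, if_neg (by omega)]
    rw [ih (s + PySem.Str.len w + 1) (by have := strlen_nonneg w; omega)]
    rfl

theorem findRef_at (p : Int) (ws : List String) : ∀ (s : Int) (k : Nat), k < ws.length →
    (startsRef ws s).getD k 0 ≤ p →
    (∀ m : Nat, k < m → m < ws.length → p < (startsRef ws s).getD m 0) →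
    findRef p ws s =
      if p < (startsRef ws s).getD k 0 + PySem.Str.len (ws.getD k "") then some k else none := by
  induction ws with
  | nil => intro s k hk; simp at hk
  | cons w ws ih =>
    intro s k hk h1 h2
    cases k with
    | zero =>
      rw [startsRef, List.getD_cons_zero] at h1 ⊢
      rw [List.getD_cons_zero]
      by_cases hp : p < s + PySem.Str.len w
      · rw [findRef, if_pos ⟨h1, hp⟩, if_pos hp]
      · rw [findRef, if_neg (by omega), if_neg hp]
        have hrec : findRef p ws (s + PySem.Str.len w + 1) = none := by
          cases ws with
          | nil => rfl
          | cons w' ws' =>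
            apply findRef_none_of_lt
            have := h2 1 (by omega) (by simp)
            rw [startsRef, List.getD_cons_succ, startsRef, List.getD_cons_zero] at this
            exact this
        rw [hrec]; rfl
    | succ k =>
      have hk' : k < ws.length := by simpa using hk
      have hge := startsRef_getD_ge ws (s + PySem.Str.len w + 1) k hk'
      rw [startsRef, List.getD_cons_succ] at h1
      rw [findRef, if_neg (by omega)]
      rw [ih (s + PySem.Str.len w + 1) k hk' h1
        (fun m hm hmlen => by
          have := h2 (m + 1) (by omega) (by simpa using hmlen)
          rw [startsRef, List.getD_cons_succ] at this
          exact this)]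
      rw [startsRef, List.getD_cons_succ, List.getD_cons_succ]
      split <;> rfl

theorem locate_eq (words : List String) (p : Int) :
    pvLocate (startsRef words 0) words p = (findRef p words 0).map (fun n => ((n : Nat) : Int)) := by
  unfold pvLocate
  obtain ⟨hle, hlo, hhi⟩ := PySem.List.bisectRight_spec (startsRef words 0) p (startsRef_pairwise words 0)
  rw [startsRef_length] at hle
  cases hr : PySem.List.bisectRight (startsRef words 0) p with
  | zero =>
    rw [hr] at hhi
    rw [if_neg (by omega)]
    cases words with
    | nil => rfl
    | cons w ws =>
      have hlen0 : 0 < (startsRef (w :: ws) 0).length := by rw [startsRef_length]; simp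
      have h0 : p < (startsRef (w :: ws) 0).getD 0 0 := by
        rw [List.getD_eq_getElem _ _ hlen0]; exact hhi 0 hlen0 (by omega)
      rw [startsRef, List.getD_cons_zero] at h0
      rw [findRef_none_of_lt p (w :: ws) 0 h0]
      rfl
  | succ k =>
    rw [hr] at hle hlo hhi
    have hk : k < words.length := by omega
    have hSk : (startsRef words 0).getD k 0 ≤ p := by
      have := hlo k (by rw [startsRef_length]; omega) (by omega)
      rwa [List.getD_eq_getElem (startsRef words 0) 0 (by rw [startsRef_length]; omega)]
    have hup : ∀ m : Nat, k < m → m < words.length → p < (startsRef words 0).getD m 0 := by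
      intro m hm hmlen
      have := hhi m (by rw [startsRef_length]; omega) (by omega)
      rwa [List.getD_eq_getElem (startsRef words 0) 0 (by rw [startsRef_length]; omega)]
    rw [findRef_at p words 0 k hk hSk hup]
    have htn : ((k : Int) + 1 - 1).toNat = k := by omega
    by_cases hc : p < (startsRef words 0).getD k 0 + PySem.Str.len (words.getD k "")
    · rw [if_pos (by push_cast; rw [htn]; constructor <;> omega), if_pos hc]
      simp
    · rw [if_neg (by push_cast; rw [htn]; omega), if_neg hc]
      rfl

theorem matchesRef_eq_merge (ns ne : Int) (ws : List String) : ∀ (i s : Int),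
    matchesRef ns ne ws i s =
      (match findRef ns ws s, findRef ne ws s with
      | none, none => ([] : List Int)
      | some a, none => [i + (a : Int)]
      | none, some b => [i + (b : Int)]
      | some a, some b =>
        if a = b then [i + (a : Int)] else [i + ((min a b : Nat) : Int), i + ((max a b : Nat) : Int)]) := by
  induction ws with
  | nil => intro i s; rfl
  | cons w ws ih =>
    intro i s
    have hL := strlen_nonneg w
    have hss : s + PySem.Str.len w - 1 + 2 = s + PySem.Str.len w + 1 := by ring
    rw [matchesRef, findRef, findRef]
    simp only [hss]
    rw [ih (i + 1) (s + PySem.Str.len w + 1)]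
    by_cases hc1 : s ≤ ns ∧ ns < s + PySem.Str.len w
    · rw [if_pos hc1]
      have hn1 : findRef ns ws (s + PySem.Str.len w + 1) = none :=
        findRef_none_of_lt ns ws _ (by omega)
      by_cases hc2 : s ≤ ne ∧ ne < s + PySem.Str.len w
      · rw [if_pos hc2, if_pos (by omega)]
        have hn2 : findRef ne ws (s + PySem.Str.len w + 1) = none :=
          findRef_none_of_lt ne ws _ (by omega)
        rw [hn1, hn2]
        simp
      · rw [if_neg hc2, if_pos (by omega), hn1]
        cases hF2 : findRef ne ws (s + PySem.Str.len w + 1) with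
        | none => simp
        | some b => simp; omega
    · rw [if_neg hc1]
      by_cases hc2 : s ≤ ne ∧ ne < s + PySem.Str.len w
      · rw [if_pos hc2]
        have hn2 : findRef ne ws (s + PySem.Str.len w + 1) = none :=
          findRef_none_of_lt ne ws _ (by omega)
        rw [hn2]
        cases hF1 : findRef ns ws (s + PySem.Str.len w + 1) with
        | none => rw [if_pos (by omega)]; simp
        | some a => rw [if_pos (by omega)]; simp; omega
      · rw [if_neg hc2, if_neg (by omega)]
        cases hF1 : findRef ns ws (s + PySem.Str.len w + 1) with
        | none =>
          cases hF2 : findRef ne ws (s + PySem.Str.len w + 1) with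
          | none => simp
          | some b => simp; omega
        | some a =>
          cases hF2 : findRef ne ws (s + PySem.Str.len w + 1) with
          | none => simp; omega
          | some b =>
            simp only [Option.map_some]
            by_cases hab : a = b
            · subst hab
              rw [if_pos rfl, if_pos rfl]
              simp only [List.nil_append, List.cons.injEq, and_true]
              omega
            · rw [if_neg hab, if_neg (show ¬(a + 1 = b + 1) by omega)]
              simp only [List.nil_append, List.cons.injEq, and_true]
              constructor <;> omega

theorem main_eq (words : List String) (ns ne : Int) :
    word_idx_extract words ns ne = word_idx_extract_alt words ns ne := by
  unfold word_idx_extract word_idx_extract_alt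
  dsimp only
  rw [rangesFold_eq words [] 0, List.nil_append, matchesFold_eq ns ne words 0 0 [],
    List.nil_append, startsFold_eq words [] 0, List.nil_append,
    matchesRef_eq_merge ns ne words 0 0, locate_eq words ns, locate_eq words ne]
  cases h1 : findRef ns words 0 with
  | none =>
    cases h2 : findRef ne words 0 with
    | none => simp [PySem.List.pyGet?]
    | some b => simp [PySem.List.pyGet?_neg_one]
  | some a =>
    cases h2 : findRef ne words 0 with
    | none => simp [PySem.List.pyGet?_neg_one]
    | some b =>
      by_cases hab : a = b
      · subst hab
        simp [PySem.List.pyGet?_neg_one]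
      · simp [hab, PySem.List.pyGet?_neg_one, Nat.cast_min, Nat.cast_max]

-- ===== VERDICT (by name: the statement is the Claim_ definition above) =====
theorem word_idx_extract_spec : Claim_equal_word_idx_extract := by
  intro words ns ne _ _
  exact main_eq words ns ne
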